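-- pv_equiv track=rewrite | github.com/bydlocoderBRN/Algorihms | Kurs/7 task.py | task_7
-- ===== SOURCE A (Python) =====
-- def task_7(n):
--     n = list(n)
--     n.sort(reverse=True)
--     count = 0
--     health = 0
--     for i in range(len(n)):
--         tmp = n.pop(0)
--         if health + tmp >=0:
--             health += tmp
--             count+=1
--     return count
-- ===== SOURCE B (Python) =====
-- def task_7(n):
--     pos = [x for x in n if x >= 0]
--     count = len(pos)
--     health = sum(pos)
--     for x in sorted((x for x in n if x < 0), reverse=True):
--         if health + x < 0:
--             break
--         health += x
--         count += 1
--     return count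
-- ===== Notes on version B (the rewrite author's own statement) =====
-- stated objective: faster
-- what changed: B aggregates all non-negative elements in one pass (count=len, health=sum) instead of looping over them, sorts only the negatives, and breaks on the first rejected negative; A sorts everything and pops the front of the list each iteration.
import Mathlib
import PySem

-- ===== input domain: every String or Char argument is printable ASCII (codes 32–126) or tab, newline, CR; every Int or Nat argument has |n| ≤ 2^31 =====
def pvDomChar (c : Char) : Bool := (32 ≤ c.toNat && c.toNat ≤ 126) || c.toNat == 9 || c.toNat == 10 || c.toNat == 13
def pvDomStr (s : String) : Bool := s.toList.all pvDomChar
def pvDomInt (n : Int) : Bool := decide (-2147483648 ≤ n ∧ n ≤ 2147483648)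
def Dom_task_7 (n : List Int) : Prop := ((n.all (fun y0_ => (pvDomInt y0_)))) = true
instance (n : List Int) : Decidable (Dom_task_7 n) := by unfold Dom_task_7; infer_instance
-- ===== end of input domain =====

-- B aggregates the non-negative elements in one pass (count = len, health = sum), sorts only the
-- negatives descending and breaks at the first rejected one; A sorts everything and pops the front
-- each iteration (objective: faster).

-- ===== PORT A =====
-- 'for i in range(len(n)): tmp = n.pop(0); …' — counter k = remaining iterations, state (xs, count, health)
def task7ALoop : Nat → List Int → Int → Int → Int
  | 0, _, count, _ => count
  | k+1, xs, count, health =>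
    match PySem.List.pop? xs 0 with
    | none => count    -- unreachable: the loop runs exactly len(n) times
    | some (tmp, rest) =>
      if health + tmp ≥ 0 then task7ALoop k rest (count + 1) (health + tmp)
      else task7ALoop k rest count health

def task_7 (n : List Int) : Int :=
  let s := PySem.List.sorted n (fun x => x) true
  task7ALoop s.length s 0 0

-- ===== PORT B =====
-- 'for x in sorted(negatives, reverse=True): if health + x < 0: break; …'
def task7BLoop : List Int → Int → Int → Int
  | [], count, _ => count
  | x :: t, count, health =>
    if health + x < 0 then count
    else task7BLoop t (count + 1) (health + x)

def task_7_alt (n : List Int) : Int :=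
  let pos := n.filter (fun x => decide (0 ≤ x))
  task7BLoop (PySem.List.sorted (n.filter (fun x => decide (x < 0))) (fun x => x) true)
    (pos.length : Int) pos.sum

-- ===== PRECONDITION & SPEC =====
def Spec_task_7 (n : List Int) (out : Int) : Prop := out = task_7_alt n
instance (n : List Int) (out : Int) : Decidable (Spec_task_7 n out) := by unfold Spec_task_7; infer_instance

-- ===== CLAIM (what is proved, stated in full; the proofs are below) =====
def Claim_equal_task_7 : Prop := ∀ (n : List Int), Dom_task_7 n → Spec_task_7 n (task_7 n)

-- ===== LEMMAS AND PROOFS =====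

-- A's loop without the counter/pop bookkeeping
def aFold : List Int → Int → Int → Int
  | [], count, _ => count
  | x :: t, count, health =>
    if health + x ≥ 0 then aFold t (count + 1) (health + x) else aFold t count health

theorem task7ALoop_eq_aFold (xs : List Int) (c h : Int) :
    task7ALoop xs.length xs c h = aFold xs c h := by
  induction xs generalizing c h with
  | nil => rfl
  | cons x t ih =>
    simp [task7ALoop, aFold, PySem.List.pop?_zero_cons]
    split_ifs with hx <;> simp [ih]

theorem aFold_append (xs ys : List Int) (c h : Int) (hx : ∀ x ∈ xs, 0 ≤ x) (hh : 0 ≤ h) :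
    aFold (xs ++ ys) c h = aFold ys (c + xs.length) (h + xs.sum) := by
  induction xs generalizing c h with
  | nil => simp
  | cons x t ih =>
    have h0 : 0 ≤ x := hx x (by simp)
    have : h + x ≥ 0 := by omega
    simp only [List.cons_append, aFold, if_pos this]
    rw [ih _ _ (fun y hy => hx y (by simp [hy])) (by omega)]
    simp; ring_nf

theorem aFold_all_neg (xs : List Int) (c h : Int) (hx : ∀ x ∈ xs, h + x < 0) :
    aFold xs c h = c := by
  induction xs with
  | nil => rfl
  | cons x t ih =>
    have : ¬ (h + x ≥ 0) := by have := hx x (by simp); omega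
    simp only [aFold, if_neg this]
    exact ih (fun y hy => hx y (by simp [hy]))

theorem aFold_eq_bLoop (xs : List Int) (c h : Int)
    (hs : xs.Pairwise (fun a b => b ≤ a)) : aFold xs c h = task7BLoop xs c h := by
  induction xs generalizing c h with
  | nil => rfl
  | cons x t ih =>
    rcases List.pairwise_cons.mp hs with ⟨hxt, ht⟩
    by_cases hx : h + x ≥ 0
    · simp only [aFold, task7BLoop, if_pos hx, if_neg (by omega : ¬ h + x < 0)]
      exact ih _ _ ht
    · simp only [aFold, task7BLoop, if_neg hx, if_pos (by omega : h + x < 0)]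
      exact aFold_all_neg t c h (fun y hy => by have := hxt y hy; omega)

-- the descending sort of n splits into descending sort of non-negatives ++ descending sort of negatives
theorem sorted_split (n : List Int) :
    PySem.List.sorted n (fun x => x) true =
      PySem.List.sorted (n.filter (fun x => decide (0 ≤ x))) (fun x => x) true ++
      PySem.List.sorted (n.filter (fun x => decide (x < 0))) (fun x => x) true := by
  apply PySem.List.eq_of_perm_of_pairwise_le_of_injective (fun x : Int => -x) neg_injective
  · have hneg : n.filter (fun x => decide (x < 0)) = n.filter (fun x => !decide (0 ≤ x)) := by
      apply List.filter_congr; intro x _; simp only [← decide_not, decide_eq_decide]; omega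
    have h1 : (PySem.List.sorted (n.filter (fun x => decide (0 ≤ x))) (fun x => x) true ++
        PySem.List.sorted (n.filter (fun x => decide (x < 0))) (fun x => x) true).Perm
        (n.filter (fun x => decide (0 ≤ x)) ++ n.filter (fun x => !decide (0 ≤ x))) := by
      rw [← hneg]
      exact (PySem.List.sorted_perm _ _ _).append (PySem.List.sorted_perm _ _ _)
    exact ((PySem.List.sorted_perm n (fun x => x) true).trans
      (h1.trans (List.filter_append_perm _ n)).symm)
  · have := PySem.List.sorted_pairwise_rev (xs := n) (key := fun x => x)
    exact this.imp (by intro a b h; omega)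
  · rw [List.pairwise_append]
    refine ⟨(PySem.List.sorted_pairwise_rev _ _).imp (by intro a b h; omega),
            (PySem.List.sorted_pairwise_rev _ _).imp (by intro a b h; omega), ?_⟩
    intro a ha b hb
    have ha' : a ∈ n.filter (fun x => decide (0 ≤ x)) := (PySem.List.mem_sorted _ _ _ _).mp ha
    have hb' : b ∈ n.filter (fun x => decide (x < 0)) := (PySem.List.mem_sorted _ _ _ _).mp hb
    have h1 : (0:Int) ≤ a := by simpa using (List.mem_filter.mp ha').2
    have h2 : b < 0 := by simpa using (List.mem_filter.mp hb').2
    omega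

-- ===== VERDICT (by name: the statement is the Claim_ definition above) =====
theorem task_7_spec : Claim_equal_task_7 := by
  intro n _
  unfold Spec_task_7 task_7 task_7_alt
  simp only []
  rw [task7ALoop_eq_aFold, sorted_split]
  have hpos : ∀ x ∈ PySem.List.sorted (n.filter (fun x => decide (0 ≤ x))) (fun x => x) true, (0:Int) ≤ x := by
    intro x hx
    have := (PySem.List.mem_sorted _ _ _ _).mp hx
    simpa using (List.mem_filter.mp this).2
  rw [aFold_append _ _ _ _ hpos le_rfl]
  rw [aFold_eq_bLoop _ _ _ ((PySem.List.sorted_pairwise_rev _ _).imp (by intro a b h; exact h))]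
  congr 1
  · simp [PySem.List.length_sorted]
  · simpa using (PySem.List.sorted_perm (n.filter (fun x => decide (0 ≤ x))) (fun x => x) true).sum_eq
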